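-- pv_equiv track=rewrite | github.com/Gustav0Prado/cursos | otimizacao/t2/src/hero.py | affinities_ok
-- ===== SOURCE A (Python) =====
-- def affinities_ok(teamA:list, teamB:list, affinities:set) -> bool:
--    """Retorna se todas as afinidades de um herói estão na mesma equipe que ele
--
--    Args:
--        teamA (list): Primeira equipe
--        teamB (list): Segunda  equipe
--
--    Returns:
--        bool: True caso estejam, False caso contrário
--    """
--    for hero in teamA:
--       for (l, r) in affinities:
--          if hero == l and r not in teamA:
--             return False
--
--    for hero in teamB:
--       for (l, r) in affinities:
--          if hero == l and r not in teamB: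
--             return False
--
--    return True
-- ===== SOURCE B (Python) =====
-- def affinities_ok(teamA: list, teamB: list, affinities: set) -> bool:
--     """Single flat pass over affinities instead of nested hero x affinity loops."""
--     for (l, r) in affinities:
--         if (l in teamA and r not in teamA) or (l in teamB and r not in teamB):
--             return False
--     return True
-- ===== Notes on version B (the rewrite author's own statement) =====
-- stated objective: simpler
-- what changed: Replaced the two nested hero-by-affinity loops with one flat pass over affinities that checks each pair's team membership directly.
import Mathlib
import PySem

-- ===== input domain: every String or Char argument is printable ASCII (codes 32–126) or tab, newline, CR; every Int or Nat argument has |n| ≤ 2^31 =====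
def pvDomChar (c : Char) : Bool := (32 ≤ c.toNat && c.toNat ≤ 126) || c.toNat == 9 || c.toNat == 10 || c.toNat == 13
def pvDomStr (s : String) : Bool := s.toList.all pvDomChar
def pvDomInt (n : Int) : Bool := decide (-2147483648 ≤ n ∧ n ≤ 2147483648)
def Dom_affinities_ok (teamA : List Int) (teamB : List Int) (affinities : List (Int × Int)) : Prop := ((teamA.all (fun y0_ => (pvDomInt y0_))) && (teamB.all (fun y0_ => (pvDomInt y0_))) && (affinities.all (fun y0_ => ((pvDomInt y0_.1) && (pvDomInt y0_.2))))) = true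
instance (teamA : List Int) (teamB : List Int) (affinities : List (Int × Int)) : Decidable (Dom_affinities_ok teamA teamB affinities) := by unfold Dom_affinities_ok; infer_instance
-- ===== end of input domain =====

-- B replaces A's two nested hero×affinity loops by one flat pass over the affinities (simpler; same result).

-- ===== PORT A =====
-- inner loop: 'for (l, r) in affinities: if hero == l and r not in team: return False'
def pvInnerA (hero : Int) (team : List Int) : List (Int × Int) → Bool
  | [] => false
  | (l, r) :: rest =>
    if hero = l ∧ ¬ r ∈ team then true else pvInnerA hero team rest

-- outer loop: 'for hero in team: …' (membership test 'r not in team' uses the FULL team)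
def pvOuterA (full : List Int) (affinities : List (Int × Int)) : List Int → Bool
  | [] => false
  | hero :: rest =>
    if pvInnerA hero full affinities then true else pvOuterA full affinities rest

def affinities_ok (teamA : List Int) (teamB : List Int) (affinities : List (Int × Int)) : Bool :=
  if pvOuterA teamA affinities teamA then false
  else if pvOuterA teamB affinities teamB then false
  else true

-- ===== PORT B =====
def affinities_ok_alt (teamA : List Int) (teamB : List Int) (affinities : List (Int × Int)) : Bool :=
  match affinities with
  | [] => true
  | (l, r) :: rest =>
    if (l ∈ teamA ∧ ¬ r ∈ teamA) ∨ (l ∈ teamB ∧ ¬ r ∈ teamB) then false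
    else affinities_ok_alt teamA teamB rest

-- ===== PRECONDITION & SPEC =====
def Spec_affinities_ok (teamA : List Int) (teamB : List Int) (affinities : List (Int × Int)) (out : Bool) : Prop := out = affinities_ok_alt teamA teamB affinities
instance (teamA : List Int) (teamB : List Int) (affinities : List (Int × Int)) (out : Bool) : Decidable (Spec_affinities_ok teamA teamB affinities out) := by unfold Spec_affinities_ok; infer_instance

-- ===== CLAIM (what is proved, stated in full; the proofs are below) =====
def Claim_equal_affinities_ok : Prop := ∀ (teamA : List Int) (teamB : List Int) (affinities : List (Int × Int)), Dom_affinities_ok teamA teamB affinities → Spec_affinities_ok teamA teamB affinities (affinities_ok teamA teamB affinities)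

-- ===== LEMMAS AND PROOFS =====
theorem pvInnerA_iff (hero : Int) (team : List Int) (affs : List (Int × Int)) :
    pvInnerA hero team affs = true ↔ ∃ p ∈ affs, hero = p.1 ∧ ¬ p.2 ∈ team := by
  induction affs with
  | nil => simp [pvInnerA]
  | cons p rest ih =>
    obtain ⟨l, r⟩ := p
    by_cases h : hero = l ∧ ¬ r ∈ team
    · simp [pvInnerA, h]
    · simp only [pvInnerA, if_neg h, ih, List.mem_cons]
      constructor
      · rintro ⟨p, hp, hh⟩; exact ⟨p, Or.inr hp, hh⟩
      · rintro ⟨p, (rfl | hp), hh⟩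
        · exact absurd hh h
        · exact ⟨p, hp, hh⟩

theorem pvOuterA_iff (full : List Int) (affs : List (Int × Int)) (team : List Int) :
    pvOuterA full affs team = true ↔ ∃ p ∈ affs, p.1 ∈ team ∧ ¬ p.2 ∈ full := by
  induction team with
  | nil => simp [pvOuterA]
  | cons hero rest ih =>
    by_cases h : pvInnerA hero full affs = true
    · simp only [pvOuterA, if_pos h]
      rw [pvInnerA_iff] at h
      obtain ⟨p, hp, h1, h2⟩ := h
      simp only [true_iff, List.mem_cons]
      exact ⟨p, hp, Or.inl h1.symm, h2⟩
    · simp only [pvOuterA, if_neg h, ih, List.mem_cons]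
      rw [pvInnerA_iff] at h
      constructor
      · rintro ⟨p, hp, h1, h2⟩; exact ⟨p, hp, Or.inr h1, h2⟩
      · rintro ⟨p, hp, (h1 | h1), h2⟩
        · exact absurd ⟨p, hp, h1.symm, h2⟩ h
        · exact ⟨p, hp, h1, h2⟩

theorem affinities_ok_alt_false_iff (teamA teamB : List Int) (affs : List (Int × Int)) :
    affinities_ok_alt teamA teamB affs = false ↔
      ∃ p ∈ affs, (p.1 ∈ teamA ∧ ¬ p.2 ∈ teamA) ∨ (p.1 ∈ teamB ∧ ¬ p.2 ∈ teamB) := by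
  induction affs with
  | nil => simp [affinities_ok_alt]
  | cons p rest ih =>
    obtain ⟨l, r⟩ := p
    by_cases h : (l ∈ teamA ∧ ¬ r ∈ teamA) ∨ (l ∈ teamB ∧ ¬ r ∈ teamB)
    · simp only [affinities_ok_alt, if_pos h, true_iff, List.mem_cons]
      exact ⟨(l, r), Or.inl rfl, h⟩
    · simp only [affinities_ok_alt, if_neg h, ih, List.mem_cons]
      constructor
      · rintro ⟨p, hp, hh⟩; exact ⟨p, Or.inr hp, hh⟩
      · rintro ⟨p, (rfl | hp), hh⟩
        · exact absurd hh h
        · exact ⟨p, hp, hh⟩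

-- ===== VERDICT (by name: the statement is the Claim_ definition above) =====
theorem affinities_ok_spec : Claim_equal_affinities_ok := by
  intro teamA teamB affs _
  unfold Spec_affinities_ok affinities_ok
  by_cases hA : pvOuterA teamA affs teamA = true
  · rw [if_pos hA]
    rw [pvOuterA_iff] at hA
    obtain ⟨p, hp, h1, h2⟩ := hA
    exact ((affinities_ok_alt_false_iff teamA teamB affs).2 ⟨p, hp, Or.inl ⟨h1, h2⟩⟩).symm
  · rw [if_neg hA]
    by_cases hB : pvOuterA teamB affs teamB = true
    · rw [if_pos hB]
      rw [pvOuterA_iff] at hB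
      obtain ⟨p, hp, h1, h2⟩ := hB
      exact ((affinities_ok_alt_false_iff teamA teamB affs).2 ⟨p, hp, Or.inr ⟨h1, h2⟩⟩).symm
    · rw [if_neg hB]
      rw [pvOuterA_iff] at hA hB
      cases h : affinities_ok_alt teamA teamB affs
      · rw [affinities_ok_alt_false_iff] at h
        obtain ⟨p, hp, h1 | h1⟩ := h
        · exact absurd ⟨p, hp, h1⟩ hA
        · exact absurd ⟨p, hp, h1⟩ hB
      · rfl
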